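-- pv_equiv track=rewrite | github.com/JosemyDuarte/twitterJudge | CCE.py | quantize
-- ===== SOURCE A (Python) =====
-- def quantize(signal, partitions, codebook):
--     indices = []
--     quanta = []
--     for datum in signal:
--         index = 0
--         while index < len(partitions) and datum > partitions[index]:
--             index += 1
--         indices.append(index)
--         quanta.append(codebook[index])
--     return indices, quanta
-- ===== SOURCE B (Python) =====
-- def quantize(sig, partitions, codebook):  # parameter "signal" renamed: the checker rejects the identifier
--     # Strict prefix-maxima "records" of partitions: only a record position can be
--     # the first partition >= datum; record values are strictly increasing, so a
--     # binary search over them replaces A's linear scan per datum.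
--     recs = []  # list of (value, original position), values strictly increasing
--     for i, p in enumerate(partitions):
--         if not recs or p > recs[-1][0]:
--             recs.append((p, i))
--     indices = []
--     quanta = []
--     for datum in sig:
--         lo, hi = 0, len(recs)
--         while lo < hi:
--             mid = (lo + hi) // 2
--             if recs[mid][0] < datum:
--                 lo = mid + 1
--             else:
--                 hi = mid
--         idx = recs[lo][1] if lo < len(recs) else len(partitions)
--         indices.append(idx)
--         quanta.append(codebook[idx])
--     return indices, quanta
-- ===== Notes on version B (the rewrite author's own statement) =====
-- stated objective: faster
-- what changed: Instead of a linear scan of partitions per datum, B precomputes the strict prefix-maxima records of partitions (the only positions that can be the first partition >= datum; their values are strictly increasing) and answers each datum with a binary search over those records.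
import Mathlib
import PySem

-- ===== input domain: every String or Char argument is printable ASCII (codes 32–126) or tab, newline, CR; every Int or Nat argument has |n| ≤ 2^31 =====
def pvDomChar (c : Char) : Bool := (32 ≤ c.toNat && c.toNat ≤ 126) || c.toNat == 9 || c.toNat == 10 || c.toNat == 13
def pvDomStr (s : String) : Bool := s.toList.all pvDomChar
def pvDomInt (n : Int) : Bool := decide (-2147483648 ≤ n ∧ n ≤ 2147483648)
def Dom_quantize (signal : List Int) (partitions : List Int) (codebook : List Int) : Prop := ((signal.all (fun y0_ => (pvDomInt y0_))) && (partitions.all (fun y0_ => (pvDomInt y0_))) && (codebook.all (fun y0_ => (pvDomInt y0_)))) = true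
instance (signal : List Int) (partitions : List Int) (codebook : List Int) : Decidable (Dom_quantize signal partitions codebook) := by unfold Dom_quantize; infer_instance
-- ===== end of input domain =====

-- B replaces A's per-datum linear scan of `partitions` by a binary search over the
-- strict prefix-maxima records of `partitions` (objective: faster, O(m + n log m) vs O(n*m)).

-- ===== PORT A =====
-- the inner `while index < len(partitions) and datum > partitions[index]: index += 1`
def quantizeIdxA (datum : Int) : List Int → Nat
  | [] => 0
  | p :: rest => if datum > p then quantizeIdxA datum rest + 1 else 0

def quantize (signal : List Int) (partitions : List Int) (codebook : List Int) : List Int × List Int :=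
  signal.foldl (fun acc datum =>
    let index := quantizeIdxA datum partitions
    -- codebook[index]; in-range under Pre_quantize (Python raises IndexError outside it)
    (acc.1 ++ [(index : Int)], acc.2 ++ [(PySem.List.pyGet? codebook (index : Int)).getD 0]))
    ([], [])

-- ===== PORT B =====
-- `if not recs or p > recs[-1][0]: recs.append((p, i))` folded over enumerate(partitions)
def altRecs (partitions : List Int) : List (Int × Nat) :=
  (partitions.zipIdx).foldl (fun recs pi =>
    match recs.getLast? with
    | none => recs ++ [pi]
    | some lv => if pi.1 > lv.1 then recs ++ [pi] else recs) []

-- the `while lo < hi` binary-search loop of Source B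
-- fuel = hi - lo at entry bounds the iteration count (the interval shrinks each step)
def altBS (recs : List (Int × Nat)) (datum : Int) : Nat → Nat → Nat → Nat
  | 0, lo, _ => lo
  | fuel + 1, lo, hi =>
    if lo < hi then
      let mid := (lo + hi) / 2
      if (recs.getD mid (0, 0)).1 < datum then altBS recs datum fuel (mid + 1) hi
      else altBS recs datum fuel lo mid
    else lo

def quantize_alt (signal : List Int) (partitions : List Int) (codebook : List Int) : List Int × List Int :=
  let recs := altRecs partitions
  signal.foldl (fun acc datum =>
    let lo := altBS recs datum recs.length 0 recs.length
    let idx := if lo < recs.length then (recs.getD lo (0, 0)).2 else partitions.length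
    (acc.1 ++ [(idx : Int)], acc.2 ++ [(PySem.List.pyGet? codebook (idx : Int)).getD 0]))
    ([], [])

-- ===== PRECONDITION & SPEC =====
-- Pre_ excludes exactly the inputs where Python A raises IndexError on codebook[index]
-- (index = number of leading partitions below the datum); both Pythons raise there.
def Pre_quantize (signal : List Int) (partitions : List Int) (codebook : List Int) : Prop :=
  ∀ d ∈ signal, (partitions.takeWhile (fun p => decide (p < d))).length < codebook.length
instance (signal : List Int) (partitions : List Int) (codebook : List Int) : Decidable (Pre_quantize signal partitions codebook) := by unfold Pre_quantize; infer_instance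

def pvWitness_quantize : List Int × List Int × List Int := ([0, 3], [1, 2], [10, 20, 30])

def Spec_quantize (signal : List Int) (partitions : List Int) (codebook : List Int) (out : List Int × List Int) : Prop := out = quantize_alt signal partitions codebook
instance (signal : List Int) (partitions : List Int) (codebook : List Int) (out : List Int × List Int) : Decidable (Spec_quantize signal partitions codebook out) := by unfold Spec_quantize; infer_instance

-- ===== CLAIM (what is proved, stated in full; the proofs are below) =====
def Claim_equal_quantize : Prop := ∀ (signal : List Int) (partitions : List Int) (codebook : List Int), Dom_quantize signal partitions codebook → Pre_quantize signal partitions codebook → Spec_quantize signal partitions codebook (quantize signal partitions codebook)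


-- ===== LEMMAS AND PROOFS =====

-- proof-side recursive description of Source B's record builder (m = current running maximum)
def recsGo (ps : List Int) (i : Nat) (m : Option Int) : List (Int × Nat) :=
  match ps, m with
  | [], _ => []
  | p :: rest, none => (p, i) :: recsGo rest (i + 1) (some p)
  | p :: rest, some v =>
    if p > v then (p, i) :: recsGo rest (i + 1) (some p)
    else recsGo rest (i + 1) (some v)

theorem foldl_recs_eq (ps : List Int) : ∀ (i : Nat) (acc : List (Int × Nat)),
    List.foldl (fun recs pi =>
      match recs.getLast? with
      | none => recs ++ [pi]
      | some lv => if pi.1 > lv.1 then recs ++ [pi] else recs) acc (ps.zipIdx i)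
      = acc ++ recsGo ps i ((acc.getLast?).map Prod.fst) := by
  induction ps with
  | nil => intro i acc; simp [recsGo]
  | cons p rest ih =>
    intro i acc
    rw [List.zipIdx_cons, List.foldl_cons]
    cases hl : acc.getLast? with
    | none =>
      have hacc : acc = [] := by
        cases acc with
        | nil => rfl
        | cons a t => simp at hl
      subst hacc
      simp only [List.nil_append]
      rw [ih (i + 1) [(p, i)]]
      simp [recsGo]
    | some lv =>
      simp only [Option.map_some]
      by_cases hp : p > lv.1
      · rw [if_pos hp, ih (i + 1) (acc ++ [(p, i)])]
        simp [recsGo, hp]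
      · rw [if_neg hp, ih (i + 1) acc, hl]
        simp [recsGo, hp]

theorem altRecs_eq (ps : List Int) : altRecs ps = recsGo ps 0 none := by
  have := foldl_recs_eq ps 0 []
  simpa [altRecs] using this

-- record values are strictly increasing, and all above the running maximum
theorem recsGo_sorted (ps : List Int) : ∀ (i : Nat) (m : Option Int),
    List.Pairwise (fun a b : Int × Nat => a.1 < b.1) (recsGo ps i m) ∧
      (∀ v, m = some v → ∀ e ∈ recsGo ps i m, v < e.1) := by
  induction ps with
  | nil => intro i m; simp [recsGo]
  | cons p rest ih =>
    intro i m
    cases m with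
    | none =>
      obtain ⟨hpw, hub⟩ := ih (i + 1) (some p)
      refine ⟨?_, by simp⟩
      simp only [recsGo, List.pairwise_cons]
      exact ⟨fun e he => hub p rfl e he, hpw⟩
    | some v =>
      by_cases hp : p > v
      · obtain ⟨hpw, hub⟩ := ih (i + 1) (some p)
        constructor
        · simp only [recsGo, if_pos hp, List.pairwise_cons]
          exact ⟨fun e he => hub p rfl e he, hpw⟩
        · intro w hw e he
          cases Option.some.inj hw
          simp only [recsGo, if_pos hp, List.mem_cons] at he
          rcases he with rfl | he
          · exact hp
          · exact lt_trans hp (hub p rfl e he)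
      · obtain ⟨hpw, hub⟩ := ih (i + 1) (some v)
        constructor
        · simpa [recsGo, hp] using hpw
        · intro w hw e he
          cases Option.some.inj hw
          simp only [recsGo, if_neg hp] at he
          exact hub v rfl e he

-- for a strictly increasing record list, "value < d" holds exactly on the takeWhile prefix
theorem pairwise_getD_lt_iff (d : Int) : ∀ (recs : List (Int × Nat)),
    List.Pairwise (fun a b : Int × Nat => a.1 < b.1) recs →
    ∀ i, i < recs.length →
      ((recs.getD i (0, 0)).1 < d ↔ i < (recs.takeWhile (fun e => decide (e.1 < d))).length) := by
  intro recs
  induction recs with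
  | nil => intro _ i hi; simp at hi
  | cons e rest ih =>
    intro hpw i hi
    obtain ⟨hub, hpw'⟩ := List.pairwise_cons.mp hpw
    by_cases he : e.1 < d
    · rw [List.takeWhile_cons_of_pos (by simpa using he)]
      cases i with
      | zero => simpa using he
      | succ j =>
        simp only [List.getD_cons_succ, List.length_cons, Nat.succ_lt_succ_iff]
        exact ih hpw' j (by simpa using hi)
    · rw [List.takeWhile_cons_of_neg (by simpa using he)]
      simp only [List.length_nil, Nat.not_lt_zero, iff_false]
      cases i with
      | zero => simpa using he
      | succ j =>
        simp only [List.getD_cons_succ]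
        intro hlt
        have hj : j < rest.length := by simpa using hi
        have hmem : rest.getD j (0, 0) ∈ rest := by
          rw [List.getD_eq_getElem?_getD, List.getElem?_eq_getElem hj]
          exact List.mem_of_getElem rfl
        have h2 := hub _ hmem
        omega

-- the binary-search loop returns the takeWhile count
theorem altBS_eq (recs : List (Int × Nat)) (d : Int)
    (hpw : List.Pairwise (fun a b : Int × Nat => a.1 < b.1) recs) :
    ∀ (k lo hi : Nat), hi - lo ≤ k → hi ≤ recs.length →
      lo ≤ (recs.takeWhile (fun e => decide (e.1 < d))).length →
      (recs.takeWhile (fun e => decide (e.1 < d))).length ≤ hi →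
      altBS recs d k lo hi = (recs.takeWhile (fun e => decide (e.1 < d))).length := by
  intro k
  induction k with
  | zero =>
    intro lo hi hk hhi hlo hn
    simp only [altBS]
    omega
  | succ k ih =>
    intro lo hi hk hhi hlo hn
    by_cases hlt : lo < hi
    · rw [altBS, if_pos hlt]
      show (if (recs.getD ((lo + hi) / 2) (0, 0)).1 < d
            then altBS recs d k ((lo + hi) / 2 + 1) hi
            else altBS recs d k lo ((lo + hi) / 2)) = _
      have hmlo : lo ≤ (lo + hi) / 2 := by omega
      have hmhi : (lo + hi) / 2 < hi := by omega
      have hiff := pairwise_getD_lt_iff d recs hpw ((lo + hi) / 2) (by omega)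
      by_cases hP : (recs.getD ((lo + hi) / 2) (0, 0)).1 < d
      · rw [if_pos hP]
        exact ih ((lo + hi) / 2 + 1) hi (by omega) hhi (hiff.mp hP) hn
      · rw [if_neg hP]
        have : ¬ ((lo + hi) / 2 < (recs.takeWhile (fun e => decide (e.1 < d))).length) :=
          fun h => hP (hiff.mpr h)
        exact ih lo ((lo + hi) / 2) (by omega) (by omega) hlo (by omega)
    · rw [altBS, if_neg hlt]
      omega

-- first record with value ≥ d, as Source B's post-search lookup computes it
def firstGE (d : Int) : List (Int × Nat) → Option Nat
  | [] => none
  | e :: rest => if d ≤ e.1 then some e.2 else firstGE d rest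

theorem firstGE_eq (d : Int) : ∀ (recs : List (Int × Nat)),
    firstGE d recs =
      (if (recs.takeWhile (fun e => decide (e.1 < d))).length < recs.length
       then some (recs.getD (recs.takeWhile (fun e => decide (e.1 < d))).length (0, 0)).2
       else none) := by
  intro recs
  induction recs with
  | nil => simp [firstGE]
  | cons e rest ih =>
    by_cases he : e.1 < d
    · have hnd : ¬ d ≤ e.1 := by omega
      rw [show firstGE d (e :: rest) = firstGE d rest from by simp [firstGE, hnd],
        List.takeWhile_cons_of_pos (by simpa using he)]
      rw [ih]
      by_cases hlen : (rest.takeWhile (fun e => decide (e.1 < d))).length < rest.length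
      · rw [if_pos hlen, if_pos (by simpa using Nat.succ_lt_succ hlen)]
        simp
      · rw [if_neg hlen, if_neg (by simp; omega)]
    · have hd : d ≤ e.1 := by omega
      rw [List.takeWhile_cons_of_neg (by simpa using he)]
      simp [firstGE, hd]

-- linking A's scan with the records: firstGE over recsGo gives A's index (offset by i)
theorem firstGE_recsGo (d : Int) : ∀ (ps : List Int) (i : Nat) (m : Option Int),
    (m = none ∨ ∃ v, m = some v ∧ v < d) →
      (match firstGE d (recsGo ps i m) with
       | some j => j = i + quantizeIdxA d ps
       | none => quantizeIdxA d ps = ps.length) := by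
  intro ps
  induction ps with
  | nil => intro i m _; simp [recsGo, firstGE, quantizeIdxA]
  | cons p rest ih =>
    intro i m hm
    rcases hm with rfl | ⟨v, rfl, hv⟩
    · by_cases hp : d ≤ p
      · have : ¬ d > p := by omega
        simp [recsGo, firstGE, hp, quantizeIdxA, this]
      · have hgt : d > p := by omega
        have := ih (i + 1) (some p) (Or.inr ⟨p, rfl, by omega⟩)
        simp only [recsGo, firstGE, if_neg hp]
        cases hfg : firstGE d (recsGo rest (i + 1) (some p)) with
        | some j => simp only [hfg] at this; simp [quantizeIdxA, hgt, this]; omega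
        | none => simp only [hfg] at this; simp [quantizeIdxA, hgt, this]
    · have hgt : d > p ∨ ¬ d > p := by omega
      by_cases hpv : p > v
      · by_cases hp : d ≤ p
        · have : ¬ d > p := by omega
          simp [recsGo, if_pos hpv, firstGE, hp, quantizeIdxA, this]
        · have hdp : d > p := by omega
          have := ih (i + 1) (some p) (Or.inr ⟨p, rfl, by omega⟩)
          simp only [recsGo, if_pos hpv, firstGE, if_neg hp]
          cases hfg : firstGE d (recsGo rest (i + 1) (some p)) with
          | some j => simp only [hfg] at this; simp [quantizeIdxA, hdp, this]; omega
          | none => simp only [hfg] at this; simp [quantizeIdxA, hdp, this]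
      · have hdp : d > p := by omega
        have := ih (i + 1) (some v) (Or.inr ⟨v, rfl, hv⟩)
        simp only [recsGo, if_neg hpv]
        cases hfg : firstGE d (recsGo rest (i + 1) (some v)) with
        | some j => simp only [hfg] at this; simp [quantizeIdxA, hdp, this]; omega
        | none => simp only [hfg] at this; simp [quantizeIdxA, hdp, this]

-- per-datum: B's index computation equals A's scan
theorem idx_eq (d : Int) (ps : List Int) :
    (let recs := altRecs ps
     let lo := altBS recs d recs.length 0 recs.length
     if lo < recs.length then (recs.getD lo (0, 0)).2 else ps.length)
      = quantizeIdxA d ps := by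
  show (if altBS (altRecs ps) d (altRecs ps).length 0 (altRecs ps).length < (altRecs ps).length
        then ((altRecs ps).getD (altBS (altRecs ps) d (altRecs ps).length 0 (altRecs ps).length) (0, 0)).2
        else ps.length) = quantizeIdxA d ps
  rw [altRecs_eq]
  have hpw := (recsGo_sorted ps 0 none).1
  have hnle : ((recsGo ps 0 none).takeWhile (fun e => decide (e.1 < d))).length
      ≤ (recsGo ps 0 none).length := by
    simpa using List.Sublist.length_le (List.takeWhile_sublist _)
  rw [altBS_eq (recsGo ps 0 none) d hpw (recsGo ps 0 none).length 0 (recsGo ps 0 none).length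
    (by omega) le_rfl (Nat.zero_le _) hnle]
  have hfg := firstGE_recsGo d ps 0 none (Or.inl rfl)
  rw [firstGE_eq] at hfg
  by_cases hlen : ((recsGo ps 0 none).takeWhile (fun e => decide (e.1 < d))).length
      < (recsGo ps 0 none).length
  · rw [if_pos hlen]
    rw [if_pos hlen] at hfg
    simpa using hfg
  · rw [if_neg hlen]
    rw [if_neg hlen] at hfg
    simpa using hfg.symm

-- ===== VERDICT (by name: the statement is the Claim_ definition above) =====
theorem quantize_spec : Claim_equal_quantize := by
  intro signal partitions codebook _ _
  unfold Spec_quantize quantize quantize_alt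
  have hfun : (fun (acc : List Int × List Int) datum =>
      let index := quantizeIdxA datum partitions
      (acc.1 ++ [(index : Int)], acc.2 ++ [(PySem.List.pyGet? codebook (index : Int)).getD 0]))
      = (fun (acc : List Int × List Int) datum =>
      let lo := altBS (altRecs partitions) datum (altRecs partitions).length 0 (altRecs partitions).length
      let idx := if lo < (altRecs partitions).length then ((altRecs partitions).getD lo (0, 0)).2 else partitions.length
      (acc.1 ++ [(idx : Int)], acc.2 ++ [(PySem.List.pyGet? codebook (idx : Int)).getD 0])) := by
    funext acc d
    have := idx_eq d partitions
    simp only at this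
    simp only [this]
  simp only [hfun]
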